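-- pv_equiv track=rewrite | github.com/15thai/SupplementaryMethod_CellProfiler | FM_extract.py | get_list_of_image_a_ids
-- ===== SOURCE A (Python) =====
-- def get_list_of_image_a_ids(N = 100):
--     ids_list = []
--     gt_id_list = []
--     a = 1
--     count = 1
--     for i in range(1, N + 1):
--         gt_id = "Image{:03d}".format(i)
--         ids_list.append([gt_id,"_a{:02d}_s{}".format(a, count)])
--         count += 1
--         if count == 10:
--             count = 1
--             a += 1
--     return ids_list
-- ===== SOURCE B (Python) =====
-- def get_list_of_image_a_ids(N = 100):
--     return [["Image{:03d}".format(i),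
--              "_a{:02d}_s{}".format((i - 1) // 9 + 1, (i - 1) % 9 + 1)]
--             for i in range(1, N + 1)]
-- ===== Notes on version B (the rewrite author's own statement) =====
-- stated objective: simpler
-- what changed: Replaces A's running (a, count) mutable counters and the 'count == 10' reset branch with a stateless list comprehension that computes each cycle position in closed form via divmod on the index.
import Mathlib
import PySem

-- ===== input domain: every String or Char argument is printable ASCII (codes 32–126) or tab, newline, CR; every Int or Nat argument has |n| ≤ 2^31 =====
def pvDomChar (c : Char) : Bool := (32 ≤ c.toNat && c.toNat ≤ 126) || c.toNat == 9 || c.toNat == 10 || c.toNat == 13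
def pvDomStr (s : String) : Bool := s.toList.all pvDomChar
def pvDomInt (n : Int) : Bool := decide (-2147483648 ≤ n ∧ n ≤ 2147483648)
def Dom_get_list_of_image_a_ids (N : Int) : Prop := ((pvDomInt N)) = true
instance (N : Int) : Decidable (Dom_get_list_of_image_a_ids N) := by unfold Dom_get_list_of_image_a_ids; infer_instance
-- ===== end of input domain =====

-- B replaces A's running (a, count) counter state and its reset branch with a
-- stateless comprehension computing each cycle position by divmod (objective: simpler).

-- ===== PORT A =====
-- "{:0wd}".format(n): zero-pad to width w (exact for the nonnegative values formatted here)
def pvPad (w : Nat) (n : Int) : String :=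
  let t := (PySem.Int.toStr n).toList
  String.ofList (List.replicate (w - t.length) '0' ++ t)

-- one iteration of A's loop body; state = (ids_list, a, count)
def pvStep (st : List (List String) × Int × Int) (i : Int) :
    List (List String) × Int × Int :=
  let gt_id := "Image" ++ pvPad 3 i
  let ids := st.1 ++ [[gt_id, "_a" ++ pvPad 2 st.2.1 ++ "_s" ++ PySem.Int.toStr st.2.2]]
  let count := st.2.2 + 1
  if count = 10 then (ids, st.2.1 + 1, 1) else (ids, st.2.1, count)

def get_list_of_image_a_ids (N : Int) : List (List String) :=
  ((PySem.List.pyRange 1 (N + 1) 1).foldl pvStep ([], 1, 1)).1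

-- ===== PORT B =====
-- the pair for index i, its cycle position computed by divmod on i-1
def pvEntry (i : Int) : List String :=
  ["Image" ++ pvPad 3 i,
   "_a" ++ pvPad 2 (PySem.Int.floordiv (i - 1) 9 + 1) ++
     "_s" ++ PySem.Int.toStr (PySem.Int.mod (i - 1) 9 + 1)]

def get_list_of_image_a_ids_alt (N : Int) : List (List String) :=
  (PySem.List.pyRange 1 (N + 1) 1).map pvEntry

-- ===== PRECONDITION & SPEC =====
def Spec_get_list_of_image_a_ids (N : Int) (out : List (List String)) : Prop := out = get_list_of_image_a_ids_alt N
instance (N : Int) (out : List (List String)) : Decidable (Spec_get_list_of_image_a_ids N out) := by unfold Spec_get_list_of_image_a_ids; infer_instance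

-- ===== CLAIM (what is proved, stated in full; the proofs are below) =====
def Claim_equal_get_list_of_image_a_ids : Prop := ∀ (N : Int), Dom_get_list_of_image_a_ids N → Spec_get_list_of_image_a_ids N (get_list_of_image_a_ids N)

-- ===== LEMMAS AND PROOFS =====

-- B's entry at i = 1 + m, its divmod written in Nat arithmetic
theorem pvEntry_eq (m : Nat) :
    pvEntry (1 + (m : Int)) =
      ["Image" ++ pvPad 3 (1 + (m : Int)),
       "_a" ++ pvPad 2 (((m / 9 : Nat) : Int) + 1) ++
         "_s" ++ PySem.Int.toStr (((m % 9 : Nat) : Int) + 1)] := by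
  have h1 : (1 : Int) + m - 1 = (m : Int) := by ring
  simp [pvEntry, h1]

-- loop invariant: after m iterations A's state is (a, count) = (m/9 + 1, m%9 + 1),
-- and running the remaining n iterations appends exactly B's entries
theorem pv_loop (n : Nat) : ∀ (m : Nat) (acc : List (List String)),
    (((List.range n).map (fun (j : Nat) => (1 : Int) + (m : Int) + (j : Int))).foldl pvStep
        (acc, ((m / 9 : Nat) : Int) + 1, ((m % 9 : Nat) : Int) + 1)).1
      = acc ++ (List.range n).map (fun (j : Nat) => pvEntry ((1 : Int) + (m : Int) + (j : Int))) := by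
  induction n with
  | zero => intro m acc; simp
  | succ n ih =>
    intro m acc
    rw [List.range_succ_eq_map, List.map_cons, List.foldl_cons, List.map_cons,
        List.map_map, List.map_map]
    have hfun : ((fun (j : Nat) => (1 : Int) + (m : Int) + (j : Int)) ∘ Nat.succ)
        = (fun (j : Nat) => (1 : Int) + ((m + 1 : Nat) : Int) + (j : Int)) := by
      funext j; simp [Function.comp, Nat.succ_eq_add_one]; ring
    have hfun2 : ((fun (j : Nat) => pvEntry ((1 : Int) + (m : Int) + (j : Int))) ∘ Nat.succ)
        = (fun (j : Nat) => pvEntry ((1 : Int) + ((m + 1 : Nat) : Int) + (j : Int))) := by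
      funext j; simp [Function.comp, Nat.succ_eq_add_one]; ring_nf
    rw [hfun, hfun2]
    have hentry : pvStep (acc, ((m / 9 : Nat) : Int) + 1, ((m % 9 : Nat) : Int) + 1)
          ((1 : Int) + (m : Int) + ((0 : Nat) : Int))
        = (acc ++ [pvEntry (1 + (m : Int))],
           (((m + 1) / 9 : Nat) : Int) + 1, (((m + 1) % 9 : Nat) : Int) + 1) := by
      rw [show ((1 : Int) + (m : Int) + ((0 : Nat) : Int)) = 1 + (m : Int) by push_cast; ring,
          pvEntry_eq]
      by_cases h : m % 9 = 8
      · have h1 : (m + 1) / 9 = m / 9 + 1 := by omega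
        have h2 : (m + 1) % 9 = 0 := by omega
        have h4 : ((m % 9 : Nat) : Int) + 1 + 1 = 10 := by omega
        simp only [pvStep, if_pos h4, Prod.mk.injEq, h1, h2]
        push_cast
        and_intros <;> trivial
      · have h1 : (m + 1) / 9 = m / 9 := by omega
        have h2 : (m + 1) % 9 = m % 9 + 1 := by omega
        have h3 : ¬ (((m % 9 : Nat) : Int) + 1 + 1 = 10) := by omega
        simp only [pvStep, if_neg h3, Prod.mk.injEq, h1, h2]
        push_cast
        and_intros <;> trivial
    rw [hentry, ih (m + 1)]
    simp

theorem get_list_of_image_a_ids_eq (N : Int) :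
    get_list_of_image_a_ids N = get_list_of_image_a_ids_alt N := by
  unfold get_list_of_image_a_ids get_list_of_image_a_ids_alt
  rw [PySem.List.pyRange_one]
  have hN : (N + 1 - 1) = N := by ring
  rw [hN]
  have h0 : (fun (k : Nat) => (1 : Int) + (k : Int))
      = (fun (j : Nat) => (1 : Int) + ((0 : Nat) : Int) + (j : Int)) := by
    funext j; simp
  rw [h0]
  have h := pv_loop N.toNat 0 []
  simp only [Nat.zero_div, Nat.zero_mod, Nat.cast_zero, zero_add, List.nil_append] at h ⊢
  rw [h]
  simp [List.map_map, Function.comp]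

-- ===== VERDICT (by name: the statement is the Claim_ definition above) =====
theorem get_list_of_image_a_ids_spec : Claim_equal_get_list_of_image_a_ids := by
  intro N _
  unfold Spec_get_list_of_image_a_ids
  exact get_list_of_image_a_ids_eq N
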